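-- pv_equiv track=rewrite | github.com/Dhiraj7854/PythonProjects | Assignmentt-3/3rd.py | height_calculator
-- ===== SOURCE A (Python) =====
-- def height_calculator(n):
--     height = 1
--     for i in range(1,n+1):
--         if i%2 != 0:
--             height *= 2
--         else:
--             height += 1
--     return height
-- ===== SOURCE B (Python) =====
-- def height_calculator(n):
--     if n < 0:
--         return 1
--     if n % 2 == 0:
--         return (1 << (n // 2 + 1)) - 1
--     return (1 << ((n + 3) // 2)) - 2
-- ===== Notes on version B (the rewrite author's own statement) =====
-- stated objective: faster
-- what changed: Replaces the linear double/increment loop by a closed-form single bit shift depending on the parity of n; intended as faster, measured tens of times faster at the largest size both finished.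
import Mathlib
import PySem

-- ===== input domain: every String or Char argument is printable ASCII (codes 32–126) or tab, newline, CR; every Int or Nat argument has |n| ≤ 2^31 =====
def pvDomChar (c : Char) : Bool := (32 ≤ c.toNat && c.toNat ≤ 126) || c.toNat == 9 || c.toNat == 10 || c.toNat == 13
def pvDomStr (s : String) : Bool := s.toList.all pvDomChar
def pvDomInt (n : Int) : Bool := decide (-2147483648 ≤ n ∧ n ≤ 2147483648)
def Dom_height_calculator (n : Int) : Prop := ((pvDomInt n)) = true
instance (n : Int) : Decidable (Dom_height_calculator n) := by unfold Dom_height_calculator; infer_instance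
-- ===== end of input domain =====

-- B replaces A's linear double/increment loop by a closed-form bit shift on the parity of n (intended as faster; measured tens of times faster at the largest size both Pythons finished).

-- ===== PORT A =====
def height_calculator (n : Int) : Int :=
  (PySem.List.pyRange 1 (n + 1) 1).foldl
    (fun height i => if PySem.Int.mod i 2 ≠ 0 then height * 2 else height + 1) 1

-- ===== PORT B =====
def height_calculator_alt (n : Int) : Int :=
  if n < 0 then 1
  else if PySem.Int.mod n 2 = 0 then 2 ^ (PySem.Int.floordiv n 2 + 1).toNat - 1
  else 2 ^ (PySem.Int.floordiv (n + 3) 2).toNat - 2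

-- ===== PRECONDITION & SPEC =====
def Spec_height_calculator (n : Int) (out : Int) : Prop := out = height_calculator_alt n
instance (n : Int) (out : Int) : Decidable (Spec_height_calculator n out) := by unfold Spec_height_calculator; infer_instance

-- ===== CLAIM (what is proved, stated in full; the proofs are below) =====
def Claim_equal_height_calculator : Prop := ∀ (n : Int), Dom_height_calculator n → Spec_height_calculator n (height_calculator n)

-- ===== LEMMAS AND PROOFS =====

theorem height_loop_eq (k : Nat) :
    (PySem.List.pyRange 1 ((k : Int) + 1) 1).foldl
      (fun height i => if PySem.Int.mod i 2 ≠ 0 then height * 2 else height + 1) 1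
    = if k % 2 = 0 then (2 : Int) ^ (k / 2 + 1) - 1 else (2 : Int) ^ ((k + 3) / 2) - 2 := by
  induction k with
  | zero =>
    rw [PySem.List.pyRange_one_eq_nil (by norm_num)]
    simp
  | succ k ih =>
    have h : ((k : Int) + 1 + 1) = ((k : Int) + 1) + 1 := by ring
    rw [show ((k + 1 : Nat) : Int) + 1 = ((k : Int) + 1) + 1 by push_cast; ring,
        PySem.List.pyRange_one_succ_right (by omega)]
    rw [List.foldl_append, ih]
    simp only [List.foldl_cons, List.foldl_nil]
    have hmod : PySem.Int.mod ((k : Int) + 1) 2 = ((k + 1) % 2 : Nat) := by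
      simp [PySem.Int.mod, Int.fmod_eq_emod]
    rw [hmod]
    rcases Nat.even_or_odd k with he | ho
    · have hk0 : k % 2 = 0 := Nat.even_iff.mp he
      have h1 : (k + 1) % 2 = 1 := by omega
      have h2 : (k + 1 + 3) / 2 = k / 2 + 2 := by omega
      simp [hk0, h1, h2, pow_succ]
      ring
    · have hk1 : k % 2 = 1 := Nat.odd_iff.mp ho
      have h1 : (k + 1) % 2 = 0 := by omega
      have h2 : (k + 1) / 2 + 1 = (k + 3) / 2 := by omega
      simp [hk1, h1, h2]
      ring

-- ===== VERDICT (by name: the statement is the Claim_ definition above) =====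
theorem height_calculator_spec : Claim_equal_height_calculator := by
  intro n _
  unfold Spec_height_calculator height_calculator height_calculator_alt
  rcases lt_or_ge n 0 with hneg | hpos
  · rw [PySem.List.pyRange_one_eq_nil (by omega)]
    simp [hneg]
  · obtain ⟨k, rfl⟩ := Int.eq_ofNat_of_zero_le hpos
    rw [height_loop_eq k]
    have hm : PySem.Int.mod (k : Int) 2 = ((k % 2 : Nat) : Int) := by
      simp [PySem.Int.mod, Int.fmod_eq_emod]
    have hd : (PySem.Int.floordiv (k : Int) 2 + 1).toNat = k / 2 + 1 := by
      simp [PySem.Int.floordiv, Int.fdiv_eq_ediv]; omega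
    have hd3 : (PySem.Int.floordiv ((k : Int) + 3) 2).toNat = (k + 3) / 2 := by
      simp [PySem.Int.floordiv, Int.fdiv_eq_ediv]; omega
    rw [hm, hd, hd3, if_neg (show ¬ ((k : Int) < 0) by omega)]
    by_cases h : k % 2 = 0
    · simp [h]
    · simp [h, show ¬ ((2:Int) ∣ (k:Int)) by omega]
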